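-- pv_equiv track=rewrite | github.com/paiml/depyler | examples/hard_merge_sort_bottom_up.py | merge_sort_bottom_up
-- ===== SOURCE A (Python) =====
-- def merge(arr: list[int], temp: list[int], left: int, mid: int, right: int) -> int:
--     """Merge two sorted halves. Returns number of comparisons."""
--     i: int = left
--     j: int = mid + 1
--     k: int = left
--     comps: int = 0
--     while i <= mid and j <= right:
--         comps = comps + 1
--         if arr[i] <= arr[j]:
--             temp[k] = arr[i]
--             i = i + 1
--         else:
--             temp[k] = arr[j]
--             j = j + 1
--         k = k + 1
--     while i <= mid:
--         temp[k] = arr[i]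
--         i = i + 1
--         k = k + 1
--     while j <= right:
--         temp[k] = arr[j]
--         j = j + 1
--         k = k + 1
--     i = left
--     while i <= right:
--         arr[i] = temp[i]
--         i = i + 1
--     return comps
--
-- def merge_sort_bottom_up(arr: list[int]) -> int:
--     """Sort array using bottom-up merge sort. Returns total comparisons."""
--     n: int = len(arr)
--     if n <= 1:
--         return 0
--     temp: list[int] = []
--     i: int = 0
--     while i < n:
--         temp.append(0)
--         i = i + 1
--     total_comps: int = 0
--     width: int = 1
--     while width < n:
--         left: int = 0
--         while left < n:
--             mid: int = left + width - 1
--             right: int = left + 2 * width - 1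
--             if mid >= n:
--                 mid = n - 1
--             if right >= n:
--                 right = n - 1
--             if mid < right:
--                 c: int = merge(arr, temp, left, mid, right)
--                 total_comps = total_comps + c
--             left = left + 2 * width
--         width = width * 2
--     return total_comps
-- ===== SOURCE B (Python) =====
-- def _merge_count(xs, ys):
--     """Merge two sorted lists, counting one comparison per <= test."""
--     out = []
--     c = 0
--     i = 0
--     j = 0
--     while i < len(xs) and j < len(ys):
--         c += 1
--         if xs[i] <= ys[j]:
--             out.append(xs[i])
--             i += 1
--         else:
--             out.append(ys[j])
--             j += 1
--     out.extend(xs[i:])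
--     out.extend(ys[j:])
--     return out, c
--
--
-- def merge_sort_bottom_up(arr: list[int]) -> int:
--     """Sort array using a run-list bottom-up merge sort. Returns total comparisons."""
--     if len(arr) <= 1:
--         return 0
--     runs = [[x] for x in arr]
--     total = 0
--     while len(runs) > 1:
--         new_runs = []
--         i = 0
--         while i + 1 < len(runs):
--             merged, c = _merge_count(runs[i], runs[i + 1])
--             new_runs.append(merged)
--             total += c
--             i += 2
--         if i < len(runs):
--             new_runs.append(runs[i])
--         runs = new_runs
--     arr[:] = runs[0]
--     return total
-- ===== Notes on version B (the rewrite author's own statement) =====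
-- stated objective: idiomatic
-- what changed: Replaces A's index/clamp arithmetic over the array with an auxiliary temp buffer by a run-list bottom-up merge sort: start from singleton runs, repeatedly merge adjacent runs pairwise with a counting list merge, carrying an odd trailing run, until one run remains (same comparison count, same in-place sort).
import Mathlib
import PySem

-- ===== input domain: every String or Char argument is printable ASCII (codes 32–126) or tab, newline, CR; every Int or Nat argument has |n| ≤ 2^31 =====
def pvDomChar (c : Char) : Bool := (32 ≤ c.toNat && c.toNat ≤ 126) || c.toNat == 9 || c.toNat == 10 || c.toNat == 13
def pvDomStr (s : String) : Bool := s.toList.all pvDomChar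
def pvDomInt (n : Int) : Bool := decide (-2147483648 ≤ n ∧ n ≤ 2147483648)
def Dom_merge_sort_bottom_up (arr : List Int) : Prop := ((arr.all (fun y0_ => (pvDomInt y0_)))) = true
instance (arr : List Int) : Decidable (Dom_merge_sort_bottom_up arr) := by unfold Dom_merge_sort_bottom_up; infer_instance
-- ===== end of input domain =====

-- B re-implements the bottom-up merge sort as a run-list sweep (split into singleton runs, repeatedly
-- merge adjacent runs pairwise) instead of A's index/clamp arithmetic over the array with a temp buffer;
-- same cost, clearer structure. The theorems are about the RETURN value (the comparison count) only:
-- both Python versions also sort arr in place, identically.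

-- ===== PORT A =====
-- arr[i] read / arr[i] = v write: every index A uses is a nonnegative in-range index,
-- where pyGetD/pySetD are exact
def getA (xs : List Int) (i : Int) : Int := PySem.List.pyGetD xs i 0

def setA (xs : List Int) (i : Int) (v : Int) : List Int := PySem.List.pySetD xs i v

-- first while loop of merge: both halves nonempty, one comparison per step
def loop1 (arr : List Int) (mid right : Int) (temp : List Int) (i j k comps : Int) :
    List Int × Int × Int × Int × Int :=
  if h : i ≤ mid ∧ j ≤ right then
    if getA arr i ≤ getA arr j then
      loop1 arr mid right (setA temp k (getA arr i)) (i + 1) j (k + 1) (comps + 1)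
    else
      loop1 arr mid right (setA temp k (getA arr j)) i (j + 1) (k + 1) (comps + 1)
  else (temp, i, j, k, comps)
termination_by ((mid + 1 - i) + (right + 1 - j)).toNat
decreasing_by all_goals omega

-- second while loop: copy the rest of the left half
def loop2 (arr : List Int) (mid : Int) (temp : List Int) (i j k comps : Int) :
    List Int × Int × Int × Int × Int :=
  if h : i ≤ mid then
    loop2 arr mid (setA temp k (getA arr i)) (i + 1) j (k + 1) comps
  else (temp, i, j, k, comps)
termination_by (mid + 1 - i).toNat
decreasing_by omega

-- third while loop: copy the rest of the right half
def loop3 (arr : List Int) (right : Int) (temp : List Int) (i j k comps : Int) :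
    List Int × Int × Int × Int × Int :=
  if h : j ≤ right then
    loop3 arr right (setA temp k (getA arr j)) i (j + 1) (k + 1) comps
  else (temp, i, j, k, comps)
termination_by (right + 1 - j).toNat
decreasing_by omega

-- fourth while loop: copy temp[left..right] back into arr
def loop4 (temp : List Int) (right : Int) (arr : List Int) (i : Int) : List Int :=
  if h : i ≤ right then
    loop4 temp right (setA arr i (getA temp i)) (i + 1)
  else arr
termination_by (right + 1 - i).toNat
decreasing_by omega

-- merge(arr, temp, left, mid, right): returns (new arr, new temp, comparisons)
def mergeA (arr temp : List Int) (left mid right : Int) : List Int × List Int × Int :=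
  match loop1 arr mid right temp left (mid + 1) left 0 with
  | (t1, i1, j1, k1, c1) =>
    match loop2 arr mid t1 i1 j1 k1 c1 with
    | (t2, i2, j2, k2, c2) =>
      match loop3 arr right t2 i2 j2 k2 c2 with
      | (t3, _, _, _, c3) => (loop4 t3 right arr left, t3, c3)

-- while i < n: temp.append(0)
def tLoop (n : Int) (i : Int) (temp : List Int) : List Int :=
  if h : i < n then tLoop n (i + 1) (temp ++ [(0 : Int)]) else temp
termination_by (n - i).toNat
decreasing_by omega

-- inner while loop over left (the '0 < width' conjunct is a totality guard only:
-- A always runs it with width ≥ 1, and the guard does not change the exit state there)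
def innerLoop (width n : Int) (arr temp : List Int) (left total : Int) :
    List Int × List Int × Int :=
  if h : left < n ∧ 0 < width then
    let mid := left + width - 1
    let right := left + 2 * width - 1
    let mid := if mid ≥ n then n - 1 else mid
    let right := if right ≥ n then n - 1 else right
    if mid < right then
      match mergeA arr temp left mid right with
      | (arr', temp', c) => innerLoop width n arr' temp' (left + 2 * width) (total + c)
    else innerLoop width n arr temp (left + 2 * width) total
  else (arr, temp, total)
termination_by (n - left).toNat
decreasing_by all_goals omega

-- outer while loop over width (same totality guard; width starts at 1 and doubles)
def outerLoop (n width : Int) (arr temp : List Int) (total : Int) :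
    List Int × List Int × Int :=
  if h : width < n ∧ 0 < width then
    match innerLoop width n arr temp 0 total with
    | (arr', temp', total') => outerLoop n (width * 2) arr' temp' total'
  else (arr, temp, total)
termination_by (n - width).toNat
decreasing_by omega

def merge_sort_bottom_up (arr : List Int) : Int :=
  let n : Int := arr.length
  if n ≤ 1 then 0
  else (outerLoop n 1 arr (tLoop n 0 []) 0).2.2

-- ===== PORT B =====
-- _merge_count: merge two sorted runs, one comparison per <= test while both are nonempty
def mergeCountB : List Int → List Int → List Int × Int
  | [], ys => (ys, 0)
  | x :: xs, [] => (x :: xs, 0)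
  | x :: xs, y :: ys =>
    if x ≤ y then
      match mergeCountB xs (y :: ys) with
      | (m, c) => (x :: m, c + 1)
    else
      match mergeCountB (x :: xs) ys with
      | (m, c) => (y :: m, c + 1)

-- one pass: merge adjacent runs two at a time, carry an odd trailing run unchanged
def passB : List (List Int) → List (List Int) × Int
  | [] => ([], 0)
  | [r] => ([r], 0)
  | r1 :: r2 :: rest =>
    match mergeCountB r1 r2 with
    | (m, c) =>
      match passB rest with
      | (rs, c') => (m :: rs, c + c')

-- termination facts the port of B needs: a pass strictly shortens a multi-run list
theorem passB_length_le (rs : List (List Int)) : (passB rs).1.length ≤ rs.length := by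
  fun_induction passB rs <;> simp_all <;> omega

theorem passB_halves (rs : List (List Int)) (h : 1 < rs.length) :
    (passB rs).1.length < rs.length := by
  match rs with
  | r1 :: r2 :: rest =>
    have := passB_length_le rest
    rcases hm : mergeCountB r1 r2 with ⟨m, c⟩
    rcases hp : passB rest with ⟨rs', c'⟩
    simp only [passB, hm, hp] at this ⊢
    simp at this ⊢; omega

-- while len(runs) > 1
def loopB (runs : List (List Int)) (total : Int) : Int :=
  if h : 1 < runs.length then
    let p := passB runs
    loopB p.1 (total + p.2)
  else total
termination_by runs.length
decreasing_by exact passB_halves runs h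

def merge_sort_bottom_up_alt (arr : List Int) : Int :=
  if arr.length ≤ 1 then 0
  else loopB (arr.map (fun x => [x])) 0

-- ===== PRECONDITION & SPEC =====
def Spec_merge_sort_bottom_up (arr : List Int) (out : Int) : Prop := out = merge_sort_bottom_up_alt arr
instance (arr : List Int) (out : Int) : Decidable (Spec_merge_sort_bottom_up arr out) := by unfold Spec_merge_sort_bottom_up; infer_instance

-- ===== CLAIM (what is proved, stated in full; the proofs are below) =====
def Claim_equal_merge_sort_bottom_up : Prop := ∀ (arr : List Int), Dom_merge_sort_bottom_up arr → Spec_merge_sort_bottom_up arr (merge_sort_bottom_up arr)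

-- ===== LEMMAS AND PROOFS =====

-- writing a block of values into a list at consecutive positions
def writeList (xs : List Int) (k : Nat) : List Int → List Int
  | [] => xs
  | v :: vs => writeList (xs.set k v) (k + 1) vs

theorem writeList_length (vs : List Int) (xs : List Int) (k : Nat) :
    (writeList xs k vs).length = xs.length := by
  induction vs generalizing xs k with
  | nil => rfl
  | cons v vs ih => simp [writeList, ih]

theorem writeList_eq (vs : List Int) (xs : List Int) (k : Nat)
    (h : k + vs.length ≤ xs.length) :
    writeList xs k vs = xs.take k ++ vs ++ xs.drop (k + vs.length) := by
  induction vs generalizing xs k with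
  | nil => simpa [writeList] using (List.take_append_drop k xs).symm
  | cons v vs ih =>
    simp only [writeList]
    simp only [List.length_cons] at h
    rw [ih (xs.set k v) (k+1) (by simp; omega)]
    rw [List.take_set, List.drop_set, if_pos (by omega)]
    rw [List.set_eq_take_append_cons_drop, if_pos (by simp; omega)]
    simp [List.take_take]
    omega

theorem drop_writeList (vs : List Int) (xs : List Int) (k : Nat)
    (h : k + vs.length ≤ xs.length) :
    (writeList xs k vs).drop k = vs ++ xs.drop (k + vs.length) := by
  rw [writeList_eq vs xs k h, List.drop_append, List.drop_append]
  simp [List.length_take]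
  have h1 : k - min k xs.length = 0 := by omega
  have h2 : k + vs.length + (k - (min k xs.length + vs.length)) = k + vs.length := by omega
  rw [h1, h2]; simp

theorem getA_drop {arr : List Int} {I : Nat} {x : Int} {r : List Int}
    (h : arr.drop I = x :: r) : getA arr (I : Int) = x := by
  have h0 : arr[I]? = some x := by
    have := @List.getElem?_drop Int arr I 0
    rw [h] at this; simpa using this.symm
  simp [getA, PySem.List.pyGetD_natCast, List.getD, h0]

theorem setA_nat (xs : List Int) (k : Nat) (v : Int) : setA xs (k : Int) v = xs.set k v := by
  simp [setA]

theorem mergeCountB_length' (u v : List Int) :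
    (mergeCountB u v).1.length = u.length + v.length := by
  fun_induction mergeCountB u v <;> simp_all <;> omega

theorem loop2_spec (u : List Int) (ru : List Int) (arr temp : List Int) (I K : Nat) (j comps : Int)
    (hI : arr.drop I = u ++ ru) :
    loop2 arr ((I : Int) + u.length - 1) temp I j K comps =
      (writeList temp K u, (I : Int) + u.length, j, (K : Int) + u.length, comps) := by
  induction u generalizing temp I K ru with
  | nil =>
    rw [loop2, dif_neg (by simp)]
    simp [writeList]
  | cons x u ih =>
    rw [loop2, dif_pos (by simp)]
    rw [getA_drop (r := u ++ ru) (by simpa using hI), setA_nat]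
    have hI' : arr.drop (I + 1) = u ++ ru := by
      have := congrArg (List.drop 1) hI
      simpa [List.drop_drop, Nat.add_comm] using this
    have := ih ru (temp.set K x) (I + 1) (K + 1) hI'
    have harg1 : (I : Int) + (x :: u).length - 1 = ((I + 1 : Nat) : Int) + u.length - 1 := by
      push_cast; simp; ring
    have harg2 : ((I : Int)) + 1 = ((I + 1 : Nat) : Int) := by push_cast; ring
    have harg3 : ((K : Int)) + 1 = ((K + 1 : Nat) : Int) := by push_cast; ring
    rw [harg1, harg2, harg3, this]
    simp [writeList]
    constructor <;> push_cast <;> ring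

theorem loop3_spec (v : List Int) (rv : List Int) (arr temp : List Int) (J K : Nat) (i comps : Int)
    (hJ : arr.drop J = v ++ rv) :
    loop3 arr ((J : Int) + v.length - 1) temp i J K comps =
      (writeList temp K v, i, (J : Int) + v.length, (K : Int) + v.length, comps) := by
  induction v generalizing temp J K rv with
  | nil =>
    rw [loop3, dif_neg (by simp)]
    simp [writeList]
  | cons y v ih =>
    rw [loop3, dif_pos (by simp)]
    rw [getA_drop (r := v ++ rv) (by simpa using hJ), setA_nat]
    have hJ' : arr.drop (J + 1) = v ++ rv := by
      have := congrArg (List.drop 1) hJ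
      simpa [List.drop_drop, Nat.add_comm] using this
    have := ih rv (temp.set K y) (J + 1) (K + 1) hJ'
    have harg1 : (J : Int) + (y :: v).length - 1 = ((J + 1 : Nat) : Int) + v.length - 1 := by
      push_cast; simp; ring
    have harg2 : ((J : Int)) + 1 = ((J + 1 : Nat) : Int) := by push_cast; ring
    have harg3 : ((K : Int)) + 1 = ((K + 1 : Nat) : Int) := by push_cast; ring
    rw [harg1, harg2, harg3, this]
    simp [writeList]
    constructor <;> push_cast <;> ring

theorem loop4_spec (m : List Int) (rest : List Int) (temp arr : List Int) (K : Nat)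
    (h : temp.drop K = m ++ rest) :
    loop4 temp ((K : Int) + m.length - 1) arr K = writeList arr K m := by
  induction m generalizing arr K rest with
  | nil =>
    rw [loop4, dif_neg (by simp)]
    rfl
  | cons x m ih =>
    rw [loop4, dif_pos (by simp)]
    rw [getA_drop (r := m ++ rest) (by simpa using h), setA_nat]
    have h' : temp.drop (K + 1) = m ++ rest := by
      have := congrArg (List.drop 1) h
      simpa [List.drop_drop, Nat.add_comm] using this
    have harg1 : (K : Int) + (x :: m).length - 1 = ((K + 1 : Nat) : Int) + m.length - 1 := by
      push_cast; simp; ring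
    have harg2 : ((K : Int)) + 1 = ((K + 1 : Nat) : Int) := by push_cast; ring
    rw [harg1, harg2, ih rest (arr.set K x) (K + 1) h']
    rfl

theorem loops123_spec (u v ru rv : List Int) (arr temp : List Int) (I J K : Nat) (comps : Int)
    (hu : arr.drop I = u ++ ru) (hv : arr.drop J = v ++ rv) :
    (match loop1 arr ((I : Int) + u.length - 1) ((J : Int) + v.length - 1) temp I J K comps with
     | (t1, i1, j1, k1, c1) =>
       match loop2 arr ((I : Int) + u.length - 1) t1 i1 j1 k1 c1 with
       | (t2, i2, j2, k2, c2) => loop3 arr ((J : Int) + v.length - 1) t2 i2 j2 k2 c2) =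
      (writeList temp K (mergeCountB u v).1, (I : Int) + u.length, (J : Int) + v.length,
        (K : Int) + u.length + v.length, comps + (mergeCountB u v).2) := by
  induction hn : u.length + v.length using Nat.strong_induction_on
    generalizing u v ru rv temp I J K comps with
  | _ n IH =>
  match u, v with
  | [], v =>
    rw [loop1, dif_neg (by simp)]
    dsimp only
    rw [loop2, dif_neg (by simp)]
    dsimp only
    rw [loop3_spec v rv arr temp J K _ _ hv]
    simp [mergeCountB]
  | x :: u, [] =>
    rw [loop1, dif_neg (by simp)]
    dsimp only
    rw [loop2_spec (x :: u) ru arr temp I K _ _ hu]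
    dsimp only
    rw [loop3, dif_neg (by simp)]
    simp [mergeCountB]
  | x :: u, y :: v =>
    have hx : getA arr (I : Int) = x := getA_drop (r := u ++ ru) (by simpa using hu)
    have hy : getA arr (J : Int) = y := getA_drop (r := v ++ rv) (by simpa using hv)
    have hu' : arr.drop (I + 1) = u ++ ru := by
      have := congrArg (List.drop 1) hu
      simpa [List.drop_drop, Nat.add_comm] using this
    have hv' : arr.drop (J + 1) = v ++ rv := by
      have := congrArg (List.drop 1) hv
      simpa [List.drop_drop, Nat.add_comm] using this
    rw [loop1, dif_pos (by constructor <;> simp)]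
    rw [hx, hy]
    by_cases hxy : x ≤ y
    · rw [if_pos hxy, setA_nat]
      have harg1 : (I : Int) + (x :: u).length - 1 = ((I + 1 : Nat) : Int) + u.length - 1 := by
        push_cast; simp; ring
      have harg2 : ((I : Int)) + 1 = ((I + 1 : Nat) : Int) := by push_cast; ring
      have harg3 : ((K : Int)) + 1 = ((K + 1 : Nat) : Int) := by push_cast; ring
      rw [harg1, harg2, harg3]
      rw [IH (u.length + (y :: v).length) (by simp at hn ⊢; omega) u (y :: v) ru rv
            (temp.set K x) (I + 1) (J) (K + 1) (comps + 1) hu' hv rfl]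
      rcases hm : mergeCountB u (y :: v) with ⟨m, c⟩
      simp [mergeCountB, hxy, hm, writeList]
      push_cast; omega
    · rw [if_neg hxy, setA_nat]
      have harg1 : (J : Int) + (y :: v).length - 1 = ((J + 1 : Nat) : Int) + v.length - 1 := by
        push_cast; simp; ring
      have harg2 : ((J : Int)) + 1 = ((J + 1 : Nat) : Int) := by push_cast; ring
      have harg3 : ((K : Int)) + 1 = ((K + 1 : Nat) : Int) := by push_cast; ring
      rw [harg1, harg2, harg3]
      rw [IH ((x :: u).length + v.length) (by simp at hn ⊢; omega) (x :: u) v ru rv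
            (temp.set K y) I (J + 1) (K + 1) (comps + 1) hu hv' rfl]
      rcases hm : mergeCountB (x :: u) v with ⟨m, c⟩
      simp [mergeCountB, hxy, hm, writeList]
      push_cast; omega

theorem mergeA_spec (pre u v post : List Int) (temp : List Int)
    (htemp : pre.length + u.length + v.length ≤ temp.length) :
    mergeA (pre ++ u ++ v ++ post) temp (pre.length : Int)
        ((pre.length : Int) + u.length - 1) ((pre.length : Int) + u.length + v.length - 1) =
      (pre ++ (mergeCountB u v).1 ++ post,
        writeList temp pre.length (mergeCountB u v).1, (mergeCountB u v).2) := by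
  set arr := pre ++ u ++ v ++ post with harr
  have hu : arr.drop pre.length = u ++ (v ++ post) := by
    simp [harr]
  have hv : arr.drop (pre.length + u.length) = v ++ post := by
    have := congrArg (List.drop u.length) hu
    simpa [List.drop_drop, List.drop_append, Nat.add_comm] using this
  have hJ : (pre.length : Int) + u.length - 1 + 1 = ((pre.length + u.length : Nat) : Int) := by
    push_cast; ring
  have hright : (pre.length : Int) + u.length + v.length - 1
      = ((pre.length + u.length : Nat) : Int) + v.length - 1 := by push_cast; ring
  have h123 := loops123_spec u v (v ++ post) post arr temp pre.length (pre.length + u.length)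
        pre.length 0 hu hv
  unfold mergeA
  rw [hJ, hright]
  rcases hl1 : loop1 arr ((pre.length : Int) + u.length - 1)
      (((pre.length + u.length : Nat) : Int) + v.length - 1) temp pre.length
      ((pre.length + u.length : Nat) : Int) pre.length 0 with ⟨t1, i1, j1, k1, c1⟩
  rw [hl1] at h123
  dsimp only at h123 ⊢
  rcases hl2 : loop2 arr ((pre.length : Int) + u.length - 1) t1 i1 j1 k1 c1 with ⟨t2, i2, j2, k2, c2⟩
  rw [hl2] at h123
  dsimp only at h123 ⊢
  rw [h123]
  dsimp only
  have hm := mergeCountB_length' u v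
  have hdrop : (writeList temp pre.length (mergeCountB u v).1).drop pre.length
      = (mergeCountB u v).1 ++ temp.drop (pre.length + (mergeCountB u v).1.length) := by
    exact drop_writeList _ temp pre.length (by omega)
  have h4 : loop4 (writeList temp pre.length (mergeCountB u v).1)
      ((pre.length : Int) + (mergeCountB u v).1.length - 1) arr pre.length
      = writeList arr pre.length (mergeCountB u v).1 :=
    loop4_spec _ _ _ arr pre.length hdrop
  have hright2 : ((pre.length + u.length : Nat) : Int) + v.length - 1
      = (pre.length : Int) + (mergeCountB u v).1.length - 1 := by
    rw [hm]; push_cast; ring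
  rw [hright2, h4]
  rw [writeList_eq _ arr pre.length (by simp [harr]; omega)]
  have htake : arr.take pre.length = pre := by simp [harr]
  have hdrop2 : arr.drop (pre.length + (mergeCountB u v).1.length) = post := by
    have hsplit : pre ++ u ++ v ++ post = (pre ++ u ++ v) ++ post := by
      simp [List.append_assoc]
    rw [hm, harr, hsplit,
      show pre.length + (u.length + v.length) = (pre ++ u ++ v).length by simp,
      List.drop_left]
  rw [htake, hdrop2]
  simp

def chunks (s : Nat) (xs : List Int) : List (List Int) :=
  if h : xs = [] ∨ s = 0 then [] else xs.take s :: chunks s (xs.drop s)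
termination_by xs.length
decreasing_by
  rcases h' : xs with _ | ⟨a, l⟩
  · simp_all
  · simp_all; omega

theorem chunks_nil (s : Nat) : chunks s [] = [] := by rw [chunks]; simp

theorem chunks_cons (s : Nat) (xs : List Int) (hx : xs ≠ []) (hs : s ≠ 0) :
    chunks s xs = xs.take s :: chunks s (xs.drop s) := by
  rw [chunks]; simp [hx, hs]

theorem chunks_one (xs : List Int) : chunks 1 xs = xs.map (fun x => [x]) := by
  induction xs with
  | nil => simp [chunks_nil]
  | cons a l ih => rw [chunks_cons 1 (a :: l) (by simp) one_ne_zero]; simp [ih]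

inductive Shaped (s : Nat) : List (List Int) → Prop
  | nil : Shaped s []
  | single (r : List Int) : r ≠ [] → r.length ≤ s → Shaped s [r]
  | cons (r : List Int) (rs : List (List Int)) :
      r.length = s → rs ≠ [] → Shaped s rs → Shaped s (r :: rs)

theorem chunks_shaped (s : Nat) (xs : List Int) (hs : s ≠ 0) : Shaped s (chunks s xs) := by
  induction hn : xs.length using Nat.strong_induction_on generalizing xs with
  | _ n IH =>
  rcases hx : xs with _ | ⟨a, l⟩
  · exact chunks_nil s ▸ Shaped.nil
  · rw [chunks_cons s (a :: l) (by simp) hs]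
    by_cases hd : (a :: l).drop s = []
    · rw [hd, chunks_nil]
      exact Shaped.single _ (by simp [hs, List.take_eq_nil_iff]) (by simp)
    · have hlen : l.length + 1 ≥ s + 1 := by
        by_contra hc
        exact hd (List.drop_eq_nil_of_le (by simp; omega))
      have hn' : l.length + 1 = n := by rw [hx] at hn; simpa using hn
      refine Shaped.cons _ _ (by simp; omega) ?_ ?_
      · rw [chunks_cons s _ hd hs]; simp
      · exact IH ((a :: l).drop s).length (by simp; omega) _ rfl

theorem shaped_flatten (s : Nat) (rs : List (List Int)) (hs : s ≠ 0) (hsh : Shaped s rs) :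
    chunks s rs.flatten = rs := by
  induction hsh with
  | nil => simpa using chunks_nil s
  | single r hr hlen =>
    have : [r].flatten = r := by simp
    rw [this, chunks_cons s r hr hs, List.take_of_length_le hlen,
      List.drop_eq_nil_of_le hlen, chunks_nil]
  | cons r rs hlen hne hsh ih =>
    have hrne : r ≠ [] := by
      intro h; rw [h] at hlen; simp at hlen; omega
    rw [List.flatten_cons, chunks_cons s _ (by simp [hrne]) hs]
    rw [List.take_append, List.drop_append]
    rw [List.take_of_length_le (by omega), List.drop_eq_nil_of_le (by omega)]
    simp [hlen, ih]

theorem passB_ne_nil (rs : List (List Int)) (h : rs ≠ []) : (passB rs).1 ≠ [] := by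
  fun_induction passB rs <;> simp_all

theorem passB_shaped (s : Nat) (hs : s ≠ 0) (rs : List (List Int)) (hsh : Shaped s rs) :
    Shaped (2 * s) (passB rs).1 := by
  induction hn : rs.length using Nat.strong_induction_on generalizing rs with
  | _ n IH =>
  match rs, hsh with
  | [], _ => exact Shaped.nil
  | [r], Shaped.single _ hr hlen => exact Shaped.single r hr (by omega)
  | r1 :: r2 :: rest, Shaped.cons _ _ hlen1 _ hsh2 =>
    rcases hm : mergeCountB r1 r2 with ⟨m, c⟩
    have hmlen : m.length = r1.length + r2.length := by
      have := mergeCountB_length' r1 r2; rw [hm] at this; simpa using this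
    rcases hrest : rest with _ | ⟨r3, rest'⟩
    · -- rest = []: Shaped s [r2]
      rcases hrest ▸ hsh2 with _ | ⟨_, hr2, hlen2⟩ | ⟨_, _, _, hne, _⟩
      · simp only [passB, hm]
        exact Shaped.single m (by intro h; rw [h] at hmlen; simp at hmlen; omega)
          (by omega)
      · simp at hne
    · -- rest ≠ []
      subst hrest
      rcases hsh2 with _ | ⟨_, _, _⟩ | ⟨_, _, hlen2, _, hsh3⟩
      have hnlen : rest'.length + 3 = n := by simpa using hn
      have ihp := IH (r3 :: rest').length (by simp; omega) (r3 :: rest') hsh3 rfl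
      simp only [passB, hm]
      rcases hp : passB (r3 :: rest') with ⟨rs', c'⟩
      rw [hp] at ihp
      exact Shaped.cons m rs' (by omega) (by
          have := passB_ne_nil (r3 :: rest') (by simp)
          rw [hp] at this; simpa using this)
        ihp

theorem chunks_flatten_id (s : Nat) (hs : s ≠ 0) (xs : List Int) :
    (chunks s xs).flatten = xs := by
  induction hn : xs.length using Nat.strong_induction_on generalizing xs with
  | _ n IH =>
  subst hn
  by_cases hx : xs = []
  · subst hx; simp [chunks_nil]
  · rw [chunks_cons s xs hx hs, List.flatten_cons,
      IH (xs.drop s).length (by simp; cases xs <;> simp_all; omega) _ rfl]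
    simp

theorem passB_flatten_length (rs : List (List Int)) :
    (passB rs).1.flatten.length = rs.flatten.length := by
  fun_induction passB rs with
  | case1 => rfl
  | case2 => rfl
  | case3 r1 r2 rest m c hm rs' c' hp ih =>
    have := mergeCountB_length' r1 r2
    rw [hm] at this
    simp_all
    omega

theorem chunks_length_le_one (s : Nat) (xs : List Int) (hs : s ≠ 0) :
    (chunks s xs).length ≤ 1 ↔ xs.length ≤ s := by
  by_cases hx : xs = []
  · subst hx; simp [chunks_nil]
  · rw [chunks_cons s xs hx hs]
    by_cases hd : xs.drop s = []
    · rw [hd, chunks_nil]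
      have : xs.length ≤ s := by
        have := congrArg List.length hd; simp at this; omega
      simp [this]
    · rw [chunks_cons s _ hd hs]
      have : ¬ xs.length ≤ s := by
        intro hc; exact hd (List.drop_eq_nil_of_le hc)
      simp [this]

theorem inner_spec (W : Nat) (hW : W ≠ 0) (suf pre temp : List Int) (total : Int)
    (htemp : temp.length = pre.length + suf.length) :
    ∃ temp', innerLoop (W : Int) ((pre.length + suf.length : Nat) : Int) (pre ++ suf) temp
        (pre.length : Int) total =
      (pre ++ (passB (chunks W suf)).1.flatten, temp', total + (passB (chunks W suf)).2) ∧
      temp'.length = temp.length := by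
  induction hn : suf.length using Nat.strong_induction_on
    generalizing suf pre temp total with
  | _ n IH =>
  subst hn
  by_cases hnil : suf = []
  · subst hnil
    rw [innerLoop, dif_neg (by simp)]
    refine ⟨temp, ?_, rfl⟩
    simp [chunks_nil, passB]
  · have hpos : 1 ≤ suf.length := List.length_pos_iff.mpr hnil
    rw [innerLoop, dif_pos (by constructor <;> push_cast <;> omega)]
    dsimp only
    by_cases hle : suf.length ≤ W
    · -- a single (final) run: no merge happens
      rw [if_neg (by split_ifs <;> push_cast <;> omega)]
      rw [innerLoop, dif_neg (by push_cast; omega)]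
      have hch : chunks W suf = [suf] := by
        rw [chunks_cons _ _ hnil hW, List.take_of_length_le hle,
          List.drop_eq_nil_of_le hle, chunks_nil]
      refine ⟨temp, ?_, rfl⟩
      simp [hch, passB]
    · -- at least two runs: a merge happens
      push_neg at hle
      set u := suf.take W with hu
      set v := (suf.drop W).take W with hv
      set rest := (suf.drop W).drop W with hrest
      have hulen : u.length = W := by simp [hu]; omega
      have hvlen : v.length = min W (suf.length - W) := by simp [hv]
      have hrlen : rest.length = suf.length - 2 * W := by simp [hrest]; omega
      have hsplit : suf = u ++ v ++ rest := by
        rw [hu, hv, hrest]; simp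
      have harr : pre ++ suf = pre ++ u ++ v ++ rest := by
        rw [hsplit]; simp
      have hclamp1 : ¬ ((pre.length : Int) + W - 1 ≥ ((pre.length + suf.length : Nat) : Int)) := by
        push_cast; omega
      have hclamp2 : (if (pre.length : Int) + 2 * W - 1 ≥ ((pre.length + suf.length : Nat) : Int)
            then ((pre.length + suf.length : Nat) : Int) - 1
            else (pre.length : Int) + 2 * W - 1)
          = (pre.length : Int) + u.length + v.length - 1 := by
        split_ifs <;> push_cast <;> omega
      rw [if_neg hclamp1, hclamp2]
      rw [if_pos (by push_cast; omega)]
      rw [harr]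
      rw [show (pre.length : Int) + (W : Int) - 1 = (pre.length : Int) + u.length - 1 by
        rw [hulen]]
      rw [mergeA_spec pre u v rest temp (by push_cast; omega)]
      rcases hm : mergeCountB u v with ⟨m, c⟩
      have hmlen : m.length = u.length + v.length := by
        have := mergeCountB_length' u v; rw [hm] at this; simpa using this
      dsimp only
      have hsufne' : suf.drop W ≠ [] := by
        intro h; have := congrArg List.length h; simp at this; omega
      have hch : chunks W suf = u :: chunks W (suf.drop W) := by
        rw [chunks_cons _ _ hnil hW]
      have hch2 : chunks W (suf.drop W) = v :: chunks W rest := by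
        rw [chunks_cons _ _ hsufne' hW]
      by_cases hbig : 2 * W ≤ suf.length
      · -- the merged run has full length 2W; recurse on the remainder via IH
        have hvW : v.length = W := by omega
        have hlen_eq : pre.length + suf.length = (pre ++ m).length + rest.length := by
          simp [hmlen]; omega
        have hleft_eq : (pre.length : Int) + 2 * (W : Int) = (((pre ++ m).length : Nat) : Int) := by
          simp [hmlen]; push_cast; omega
        have harr2 : pre ++ m ++ rest = (pre ++ m) ++ rest := by simp
        rw [hlen_eq, hleft_eq, harr2]
        obtain ⟨temp', heq, hlen'⟩ := IH rest.length (by omega) rest (pre ++ m)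
          (writeList temp pre.length m) (total + c)
          (by rw [writeList_length]; simp [htemp, hmlen]; omega) rfl
        refine ⟨temp', ?_, by rw [hlen', writeList_length]⟩
        rw [heq]
        rw [hch, hch2]
        rcases hp : passB (chunks W rest) with ⟨rs', c'⟩
        simp only [passB, hm, hp]
        simp
        ring
      · -- the merged run swallows the whole tail: the next left is past the end
        push_neg at hbig
        have hrnil : rest = [] := by
          rw [hrest]; apply List.drop_eq_nil_of_le; simp; omega
        have hvlen' : v.length = suf.length - W := by omega
        rw [innerLoop, dif_neg (by push_cast; omega)]
        have hch3 : chunks W rest = [] := by rw [hrnil, chunks_nil]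
        refine ⟨writeList temp pre.length m, ?_, by rw [writeList_length]⟩
        rw [hch, hch2, hch3]
        simp only [passB, hm]
        simp [hrnil]

theorem outer_spec (W : Nat) (hW : W ≠ 0) (arr temp : List Int) (total : Int)
    (htemp : temp.length = arr.length) :
    (outerLoop (arr.length : Int) (W : Int) arr temp total).2.2
      = loopB (chunks W arr) total := by
  induction hk : arr.length - W using Nat.strong_induction_on
    generalizing W arr temp total with
  | _ k IH =>
  subst hk
  rw [outerLoop]
  by_cases hlt : W < arr.length
  · rw [dif_pos (by constructor <;> push_cast <;> omega)]
    obtain ⟨temp', heq, hlen'⟩ := inner_spec W hW arr [] temp total (by simpa using htemp)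
    simp only [List.nil_append, List.length_nil, Nat.zero_add, Nat.cast_zero] at heq
    rw [heq]
    have hflat : (passB (chunks W arr)).1.flatten.length = arr.length := by
      rw [passB_flatten_length, chunks_flatten_id W hW]
    have hsh : Shaped (2 * W) (passB (chunks W arr)).1 :=
      passB_shaped W hW _ (chunks_shaped W arr hW)
    have hch : chunks (2 * W) (passB (chunks W arr)).1.flatten = (passB (chunks W arr)).1 :=
      shaped_flatten (2 * W) _ (by omega) hsh
    have hcast : (W : Int) * 2 = ((2 * W : Nat) : Int) := by push_cast; ring
    have hcast2 : (arr.length : Int) = ((passB (chunks W arr)).1.flatten.length : Int) := by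
      rw [hflat]
    rw [hcast, hcast2]
    rw [IH ((passB (chunks W arr)).1.flatten.length - 2 * W) (by omega) (2 * W) (by omega)
      _ temp' _ (by rw [hlen', htemp, ← hflat]) rfl]
    rw [hch]
    have hgt : 1 < (chunks W arr).length := by
      have h2 : ¬ (chunks W arr).length ≤ 1 :=
        fun hc => (by omega : ¬ arr.length ≤ W) ((chunks_length_le_one W arr hW).mp hc)
      omega
    conv_rhs => rw [loopB, dif_pos hgt]
  · rw [dif_neg (by push_cast; omega)]
    rw [loopB, dif_neg (by
      have := (chunks_length_le_one W arr hW).mpr (by omega)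
      omega)]

theorem tLoop_length (n : Int) (i : Int) (acc : List Int) :
    (tLoop n i acc).length = acc.length + (n - i).toNat := by
  induction hk : (n - i).toNat using Nat.strong_induction_on generalizing i acc with
  | _ k IH =>
  subst hk
  rw [tLoop]
  split_ifs with h
  · rw [IH (n - (i + 1)).toNat (by omega) (i + 1) (acc ++ [0]) rfl]
    simp; omega
  · simp; omega

theorem main_equiv (arr : List Int) :
    merge_sort_bottom_up arr = merge_sort_bottom_up_alt arr := by
  unfold merge_sort_bottom_up merge_sort_bottom_up_alt
  dsimp only
  by_cases h : (arr.length : Int) ≤ 1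
  · rw [if_pos h, if_pos (by exact_mod_cast h)]
  · rw [if_neg h, if_neg (by push_cast at h; omega)]
    have htl : (tLoop (arr.length : Int) 0 []).length = arr.length := by
      rw [tLoop_length]; simp
    have := outer_spec 1 one_ne_zero arr (tLoop (arr.length : Int) 0 []) 0 htl
    rw [show ((1 : Nat) : Int) = (1 : Int) by simp] at this
    rw [this, chunks_one]

-- ===== VERDICT (by name: the statement is the Claim_ definition above) =====
theorem merge_sort_bottom_up_spec : Claim_equal_merge_sort_bottom_up := by
  intro arr _
  unfold Spec_merge_sort_bottom_up
  exact main_equiv arr
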